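-- pv_equiv track=rewrite | github.com/apache/airflow | scripts/ci/testing/get_min_airflow_version_for_python.py | get_min_airflow_version_for_python
-- ===== SOURCE A (Python) =====
-- MIN_AIRFLOW_VERSION_BY_PYTHON = {
--     "3.10": "2.11.0",
--     "3.13": "3.1.0",
--     "3.14": "3.2.0",
-- }
--
-- def _version_key(version: str) -> tuple[int, ...]:
--     return tuple(int(part) for part in version.split("."))
--
-- def get_min_airflow_version_for_python(python_version: str) -> str:
--     """
--     Return the minimum supported Airflow version for the given Python version.
--
--     Unknown future Python versions inherit the latest known minimum Airflow version so the
--     requirement never decreases when a new Python version is added to the DB test matrix.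
--     """
--
--     matching_versions = [
--         version
--         for version in MIN_AIRFLOW_VERSION_BY_PYTHON
--         if _version_key(version) <= _version_key(python_version)
--     ]
--     if not matching_versions:
--         raise ValueError(f"No minimum Airflow version defined for Python {python_version}")
--     return MIN_AIRFLOW_VERSION_BY_PYTHON[max(matching_versions, key=_version_key)]
-- ===== SOURCE B (Python) =====
-- MIN_AIRFLOW_VERSION_BY_PYTHON = {
--     "3.10": "2.11.0",
--     "3.13": "3.1.0",
--     "3.14": "3.2.0",
-- }
--
-- def _version_key(version: str) -> tuple[int, ...]:
--     return tuple(int(part) for part in version.split("."))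
--
-- _VERSIONS_DESC = sorted(MIN_AIRFLOW_VERSION_BY_PYTHON, key=_version_key, reverse=True)
--
-- def get_min_airflow_version_for_python(python_version: str) -> str:
--     target = _version_key(python_version)
--     for version in _VERSIONS_DESC:
--         if _version_key(version) <= target:
--             return MIN_AIRFLOW_VERSION_BY_PYTHON[version]
--     raise ValueError(f"No minimum Airflow version defined for Python {python_version}")
-- ===== Notes on version B (the rewrite author's own statement) =====
-- stated objective: alternative
-- what changed: B replaces A's filter-all-matching-then-max-by-key pass with a sort-once (descending by version key) and a short-circuit scan returning the value of the first key <= the target.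
import Mathlib
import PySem

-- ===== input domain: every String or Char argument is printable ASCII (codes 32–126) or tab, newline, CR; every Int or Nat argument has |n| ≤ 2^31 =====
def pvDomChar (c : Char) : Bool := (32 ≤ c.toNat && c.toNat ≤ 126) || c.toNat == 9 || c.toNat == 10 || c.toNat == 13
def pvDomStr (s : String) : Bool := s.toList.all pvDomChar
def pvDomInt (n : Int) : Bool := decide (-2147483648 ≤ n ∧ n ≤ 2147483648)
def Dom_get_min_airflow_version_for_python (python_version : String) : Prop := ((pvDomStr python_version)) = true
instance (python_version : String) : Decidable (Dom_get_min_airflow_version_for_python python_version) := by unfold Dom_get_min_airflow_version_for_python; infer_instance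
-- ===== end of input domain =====

-- B sorts the known versions once (descending by version key) and returns the value of the
-- first key ≤ the target, instead of A's filter-then-max; objective: alternative decomposition.

-- shared module context: MIN_AIRFLOW_VERSION_BY_PYTHON and _version_key
def minAirflowDict : PySem.Dict String String :=
  PySem.Dict.ofList [("3.10", "2.11.0"), ("3.13", "3.1.0"), ("3.14", "3.2.0")]

-- Python's lexicographic comparison on tuples of ints (ported by hand, exact: PySem has no
-- variable-length tuple order; a ≤ b and a < b on tuple[int, ...])
def tupLt : List Int → List Int → Bool
  | [], [] => false
  | [], _ :: _ => true
  | _ :: _, [] => false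
  | a :: as, b :: bs => if a < b then true else if b < a then false else tupLt as bs

def tupLe : List Int → List Int → Bool
  | [], _ => true
  | _ :: _, [] => false
  | a :: as, b :: bs => if a < b then true else if b < a then false else tupLe as bs

-- _version_key(version): tuple(int(part) for part in version.split(".")); none = int() raised ValueError
def versionKey? (version : String) : Option (List Int) :=
  (PySem.Chars.splitOn version.toList ['.']).mapM PySem.Int.ofChars?

-- ===== PORT A =====
def get_min_airflow_version_for_python (python_version : String) : String :=
  match versionKey? python_version with
  | none => ""          -- int() raises ValueError inside the comprehension; excluded by Pre_
  | some pk =>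
    let matching_versions :=
      (minAirflowDict.keys).filter (fun v => tupLe ((versionKey? v).getD []) pk)
    match matching_versions with
    | [] => ""          -- raise ValueError(...); excluded by Pre_
    | m :: rest =>
      -- max(matching_versions, key=_version_key): running max, first maximal kept (by hand: tuple key)
      let best := rest.foldl
        (fun b x => if tupLt ((versionKey? b).getD []) ((versionKey? x).getD []) then x else b) m
      minAirflowDict.getD best ""

-- ===== PORT B =====
-- sorted(MIN_AIRFLOW_VERSION_BY_PYTHON, key=_version_key, reverse=True): insertion sort by hand
-- (tuple-valued key; stability irrelevant here but insertion shape matches PySem's sorted)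
def insertDescBy : String → List String → List String
  | x, [] => [x]
  | x, y :: ys =>
      if tupLt ((versionKey? y).getD []) ((versionKey? x).getD []) then x :: y :: ys
      else y :: insertDescBy x ys

def versionsDesc : List String :=
  (minAirflowDict.keys).foldl (fun acc x => insertDescBy x acc) []

def scanDesc (target : List Int) : List String → String
  | [] => ""            -- raise ValueError(...); excluded by Pre_
  | v :: vs =>
      if tupLe ((versionKey? v).getD []) target then minAirflowDict.getD v ""
      else scanDesc target vs

def get_min_airflow_version_for_python_alt (python_version : String) : String :=
  match versionKey? python_version with
  | none => ""          -- _version_key raises ValueError; excluded by Pre_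
  | some target => scanDesc target versionsDesc

-- ===== PRECONDITION & SPEC =====
-- Pre_ excludes exactly the inputs where A raises ValueError: python_version does not parse as a
-- dotted tuple of ints, or its version key is below (3, 10) so no known version matches.
-- closed form: the version string parses, and its key is lexicographically ≥ (3, 10):
-- first component > 3, or first component = 3 with a second component ≥ 10.
def Pre_get_min_airflow_version_for_python (python_version : String) : Prop :=
  match versionKey? python_version with
  | none => False
  | some pk => 3 < pk.getD 0 0 ∨ (pk.getD 0 0 = 3 ∧ 2 ≤ pk.length ∧ 10 ≤ pk.getD 1 0)

instance (python_version : String) : Decidable (Pre_get_min_airflow_version_for_python python_version) := by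
  unfold Pre_get_min_airflow_version_for_python
  cases versionKey? python_version <;> simp <;> infer_instance

def pvWitness_get_min_airflow_version_for_python : String := "3.12"

def Spec_get_min_airflow_version_for_python (python_version : String) (out : String) : Prop := out = get_min_airflow_version_for_python_alt python_version
instance (python_version : String) (out : String) : Decidable (Spec_get_min_airflow_version_for_python python_version out) := by unfold Spec_get_min_airflow_version_for_python; infer_instance

-- ===== CLAIM (what is proved, stated in full; the proofs are below) =====
def Claim_equal_get_min_airflow_version_for_python : Prop := ∀ (python_version : String), Dom_get_min_airflow_version_for_python python_version → Pre_get_min_airflow_version_for_python python_version → Spec_get_min_airflow_version_for_python python_version (get_min_airflow_version_for_python python_version)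

-- ===== LEMMAS AND PROOFS =====

theorem tupLe_trans (a b c : List Int) (h1 : tupLe a b = true) (h2 : tupLe b c = true) :
    tupLe a c = true := by
  induction a generalizing b c with
  | nil => simp [tupLe]
  | cons x xs ih =>
    cases b with
    | nil => simp [tupLe] at h1
    | cons y ys =>
      cases c with
      | nil => simp [tupLe] at h2
      | cons z zs =>
        simp only [tupLe] at h1 h2 ⊢
        split_ifs at h1 h2 ⊢ <;>
          first | rfl | omega | (exact ih _ _ h1 h2)

-- ===== VERDICT (by name: the statement is the Claim_ definition above) =====
theorem get_min_airflow_version_for_python_spec : Claim_equal_get_min_airflow_version_for_python := by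
  intro pv hdom hpre
  unfold Spec_get_min_airflow_version_for_python
  unfold Pre_get_min_airflow_version_for_python at hpre
  cases hk : versionKey? pv with
  | none => rw [hk] at hpre; exact absurd hpre id
  | some pk =>
    rw [hk] at hpre
    have h10 : tupLe [(3 : Int), 10] pk = true := by
      match pk, hpre with
      | [], h => simp at h
      | [a], h => simp at h; simp [tupLe]; omega
      | a :: b :: rest, h => simp at h; simp [tupLe]; omega
    have e10 : versionKey? "3.10" = some [3, 10] := by decide
    have e13 : versionKey? "3.13" = some [3, 13] := by decide
    have e14 : versionKey? "3.14" = some [3, 14] := by decide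
    have hd : versionsDesc = ["3.14", "3.13", "3.10"] := by decide
    have hkeys : minAirflowDict.keys = ["3.10", "3.13", "3.14"] := by decide
    have t1 : tupLt [(3 : Int), 10] [(3 : Int), 13] = true := by decide
    have t3 : tupLt [(3 : Int), 13] [(3 : Int), 14] = true := by decide
    unfold get_min_airflow_version_for_python get_min_airflow_version_for_python_alt
    rw [hk, hd, hkeys]
    cases h14 : tupLe [(3 : Int), 14] pk with
    | true =>
      have h13 : tupLe [(3 : Int), 13] pk = true := tupLe_trans _ _ _ (by decide) h14
      simp [scanDesc, e10, e13, e14, h10, h13, h14, t1, t3,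
            List.filter, List.foldl]
    | false =>
      cases h13 : tupLe [(3 : Int), 13] pk with
      | true =>
        simp [scanDesc, e10, e13, e14, h10, h13, h14, t1,
              List.filter, List.foldl]
      | false =>
        simp [scanDesc, e10, e13, e14, h10, h13, h14,
              List.filter, List.foldl]
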